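-- pv_equiv track=rewrite | github.com/Jincrediblez/swing-trade-workflow | scripts/data_formatter.py | format_news_items
-- ===== SOURCE A (Python) =====
-- from typing import Any, Dict, List, Optional
--
-- def format_news_items(news_items: List[Dict[str, str]]) -> str:
--     if not news_items:
--         return "Data unavailable from local automation."
--
--     lines: List[str] = []
--     for index, item in enumerate(news_items, start=1):
--         lines.append(f"{index}. **{item.get('title', 'Untitled item')}**")
--         lines.append(f"   - Published: {item.get('publish_time', 'N/A')}")
--         lines.append(f"   - Source: {item.get('source', 'N/A')}")
--         if item.get("url"):
--             lines.append(f"   - Link: {item['url']}")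
--         lines.append("")
--     return "\n".join(lines).rstrip()
-- ===== SOURCE B (Python) =====
-- from typing import Any, Dict, List, Optional
--
-- def _render(items: List[Dict[str, str]], index: int) -> str:
--     """Recursively render items starting at `index`, each block followed by a blank line."""
--     if not items:
--         return ""
--     item = items[0]
--     s = f"{index}. **{item.get('title', 'Untitled item')}**\n"
--     s += f"   - Published: {item.get('publish_time', 'N/A')}\n"
--     s += f"   - Source: {item.get('source', 'N/A')}\n"
--     if item.get("url"):
--         s += f"   - Link: {item['url']}\n"
--     return s + "\n" + _render(items[1:], index + 1)
--
-- def format_news_items(news_items: List[Dict[str, str]]) -> str: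
--     if not news_items:
--         return "Data unavailable from local automation."
--     return _render(news_items, 1).rstrip()
-- ===== Notes on version B (the rewrite author's own statement) =====
-- stated objective: alternative
-- what changed: B replaces A's iterative list-of-lines accumulation plus '\n'.join with a direct recursion over the item list that concatenates each item's text (with explicit newlines) straight onto the result string, rstripping once at the end; no intermediate list, no join, no enumerate.
import Mathlib
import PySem

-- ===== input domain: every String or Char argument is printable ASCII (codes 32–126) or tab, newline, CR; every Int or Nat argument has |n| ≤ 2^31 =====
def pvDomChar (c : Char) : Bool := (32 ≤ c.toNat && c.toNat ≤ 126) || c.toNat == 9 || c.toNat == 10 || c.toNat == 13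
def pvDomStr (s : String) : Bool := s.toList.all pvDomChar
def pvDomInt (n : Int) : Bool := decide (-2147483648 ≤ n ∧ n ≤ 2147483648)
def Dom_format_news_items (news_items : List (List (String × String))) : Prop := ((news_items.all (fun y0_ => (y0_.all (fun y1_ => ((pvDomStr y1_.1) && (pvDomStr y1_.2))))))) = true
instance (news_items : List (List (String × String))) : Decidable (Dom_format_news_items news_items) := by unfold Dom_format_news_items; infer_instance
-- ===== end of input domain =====

-- B renders the items by direct recursion, concatenating each item's text (explicit newlines) onto one string — no line list, no join, no enumerate.

-- dict.get(k, d): first match in the association list, else the default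
def pvGet (item : List (String × String)) (k d : String) : String :=
  match item.find? (fun p => p.1 == k) with
  | some p => p.2
  | none => d

-- ===== PORT A =====
def format_news_items (news_items : List (List (String × String))) : String :=
  if news_items = [] then "Data unavailable from local automation."
  else
    let lines := (PySem.List.enumerate news_items 1).foldl (fun lines p =>
      let lines := lines ++ [PySem.Int.toStr p.1 ++ ". **" ++ pvGet p.2 "title" "Untitled item" ++ "**"]
      let lines := lines ++ ["   - Published: " ++ pvGet p.2 "publish_time" "N/A"]
      let lines := lines ++ ["   - Source: " ++ pvGet p.2 "source" "N/A"]
      let lines := if pvGet p.2 "url" "" ≠ "" then lines ++ ["   - Link: " ++ pvGet p.2 "url" ""] else lines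
      lines ++ [""]) []
    PySem.Str.rstrip (PySem.Str.join "\n" lines)

-- ===== PORT B =====
-- _render: recursive rendering, each item's block followed by a blank line
def pvRender : List (List (String × String)) → Int → String
  | [], _ => ""
  | item :: rest, index =>
    let s := PySem.Int.toStr index ++ ". **" ++ pvGet item "title" "Untitled item" ++ "**" ++ "\n"
    let s := s ++ "   - Published: " ++ pvGet item "publish_time" "N/A" ++ "\n"
    let s := s ++ "   - Source: " ++ pvGet item "source" "N/A" ++ "\n"
    let s := if pvGet item "url" "" ≠ "" then s ++ "   - Link: " ++ pvGet item "url" "" ++ "\n" else s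
    s ++ "\n" ++ pvRender rest (index + 1)

def format_news_items_alt (news_items : List (List (String × String))) : String :=
  if news_items = [] then "Data unavailable from local automation."
  else PySem.Str.rstrip (pvRender news_items 1)

-- ===== PRECONDITION & SPEC =====
def Spec_format_news_items (news_items : List (List (String × String))) (out : String) : Prop := out = format_news_items_alt news_items
instance (news_items : List (List (String × String))) (out : String) : Decidable (Spec_format_news_items news_items out) := by unfold Spec_format_news_items; infer_instance

-- ===== CLAIM =====
def Claim_equal_format_news_items : Prop := ∀ (news_items : List (List (String × String))), Dom_format_news_items news_items → Spec_format_news_items news_items (format_news_items news_items)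

-- ===== LEMMAS AND PROOFS =====

-- the (3 or 4) lines A produces for one enumerated item
def pvLines (p : Int × List (String × String)) : List String :=
  let block := [PySem.Int.toStr p.1 ++ ". **" ++ pvGet p.2 "title" "Untitled item" ++ "**",
                "   - Published: " ++ pvGet p.2 "publish_time" "N/A",
                "   - Source: " ++ pvGet p.2 "source" "N/A"]
  if pvGet p.2 "url" "" ≠ "" then block ++ ["   - Link: " ++ pvGet p.2 "url" ""] else block

theorem loopA_eq (l : List (Int × List (String × String))) (acc : List String) :
    l.foldl (fun lines p =>
      let lines := lines ++ [PySem.Int.toStr p.1 ++ ". **" ++ pvGet p.2 "title" "Untitled item" ++ "**"]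
      let lines := lines ++ ["   - Published: " ++ pvGet p.2 "publish_time" "N/A"]
      let lines := lines ++ ["   - Source: " ++ pvGet p.2 "source" "N/A"]
      let lines := if pvGet p.2 "url" "" ≠ "" then lines ++ ["   - Link: " ++ pvGet p.2 "url" ""] else lines
      lines ++ [""]) acc = acc ++ l.flatMap (fun p => pvLines p ++ [""]) := by
  induction l generalizing acc with
  | nil => simp
  | cons p l ih =>
    simp only [List.foldl_cons, List.flatMap_cons, ih]
    unfold pvLines
    split_ifs <;> simp

-- "join sep ls ++ sep" = each element followed by sep, for nonempty ls
theorem join_flat (ls : List (List Char)) (h : ls ≠ []) :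
    PySem.Chars.join ['\n'] ls ++ ['\n'] = ls.flatMap (fun l => l ++ ['\n']) := by
  induction ls with
  | nil => simp at h
  | cons a ls ih =>
    cases ls with
    | nil => simp [PySem.Chars.join_singleton]
    | cons b ls' =>
      rw [PySem.Chars.join_cons_cons, List.flatMap_cons, ← ih (by simp)]
      simp [List.append_assoc]

theorem rstrip_append_newline (x : List Char) :
    PySem.Chars.rstrip (x ++ ['\n']) = PySem.Chars.rstrip x := by
  unfold PySem.Chars.rstrip
  have h : PySem.Chars.isspace '\n' = true := by decide
  simp [h]

-- B's recursion produces exactly A's lines, each with a trailing '\n'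
theorem render_toList (items : List (List (String × String))) (i : Int) :
    (pvRender items i).toList
      = (PySem.List.enumerate items i).flatMap
          (fun p => (pvLines p ++ [""]).flatMap (fun l => l.toList ++ ['\n'])) := by
  induction items generalizing i with
  | nil => simp [pvRender, PySem.List.enumerate_nil]
  | cons item rest ih =>
    rw [PySem.List.enumerate_cons, List.flatMap_cons]
    simp only [pvRender, pvLines]
    split_ifs <;> simp [ih, pvLines, List.append_assoc]

-- ===== VERDICT =====
theorem format_news_items_spec : Claim_equal_format_news_items := by
  intro news_items _
  unfold Spec_format_news_items format_news_items format_news_items_alt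
  by_cases h : news_items = []
  · simp [h]
  · simp only [if_neg h]
    rw [loopA_eq]
    simp only [List.nil_append]
    set l := PySem.List.enumerate news_items 1 with hl
    have hlne : l.flatMap (fun p => pvLines p ++ [""]) ≠ [] := by
      rw [hl]
      cases news_items with
      | nil => exact absurd rfl h
      | cons a t =>
        simp only [PySem.List.enumerate_cons, List.flatMap_cons, List.append_assoc]
        simp
    unfold PySem.Str.rstrip
    congr 1
    have key : (PySem.Str.join "\n" (l.flatMap (fun p => pvLines p ++ [""]))).toList ++ ['\n']
        = (pvRender news_items 1).toList := by
      rw [PySem.Str.toList_join]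
      have hsep : ("\n" : String).toList = ['\n'] := by decide
      rw [hsep, join_flat _ (by simpa using hlne), render_toList, ← hl]
      simp [List.flatMap_map, List.flatMap_assoc]
    calc PySem.Chars.rstrip (PySem.Str.join "\n" (l.flatMap (fun p => pvLines p ++ [""]))).toList
        = PySem.Chars.rstrip ((PySem.Str.join "\n" (l.flatMap (fun p => pvLines p ++ [""]))).toList ++ ['\n']) := (rstrip_append_newline _).symm
      _ = PySem.Chars.rstrip (pvRender news_items 1).toList := by rw [key]
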